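-- pv_equiv track=rewrite | github.com/Altu-Bitu-2/Altu-Bitu2-assignment | 05월 10일 - 구현 & 코너케이스/3613.py | is_cplus
-- ===== SOURCE A (Python) =====
-- def is_cplus(s):
--     if not s.islower():
--         return False
--     if s[0] == '_' or s[-1] == '_': #변수명이 _로 시작하거나 끝날때
--         return False
--
--     #변수명에 '_'가 연속될 때
--     prev = s[0]
--     for i in s[1:]:
--         if prev == '_' and prev == i:
--             return False
--         prev = i
--     return True
-- ===== SOURCE B (Python) =====
-- def is_cplus(s):
--     # tokenise on the underscore separator: the name is valid iff it is
--     # all-lowercase and the split yields no empty token (an empty token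
--     # appears exactly for a leading, trailing or doubled underscore)
--     return s.islower() and '' not in s.split('_')
-- ===== Notes on version B (the rewrite author's own statement) =====
-- stated objective: alternative
-- what changed: Replaces A's three separate underscore checks (first char, last char, and a prev-tracking pairwise scan for doubled underscores) with a tokenising strategy: split the name on the underscore separator and accept iff no empty token appears; the C-level str.split makes it measurably faster.
import Mathlib
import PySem

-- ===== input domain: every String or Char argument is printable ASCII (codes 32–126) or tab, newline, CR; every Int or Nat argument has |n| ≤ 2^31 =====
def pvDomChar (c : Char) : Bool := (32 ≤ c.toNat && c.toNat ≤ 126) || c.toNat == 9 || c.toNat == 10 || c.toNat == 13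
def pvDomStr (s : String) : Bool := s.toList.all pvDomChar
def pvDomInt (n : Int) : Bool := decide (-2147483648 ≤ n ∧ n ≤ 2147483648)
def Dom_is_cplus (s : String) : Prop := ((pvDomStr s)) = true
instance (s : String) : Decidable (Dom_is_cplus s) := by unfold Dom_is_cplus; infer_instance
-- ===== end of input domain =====

-- B is an alternative tokenising strategy: split the name on the underscore separator and accept iff islower holds and
-- no empty token appears (empty token = leading, trailing or doubled underscore), replacing A's three separate checks.

-- ===== PORT A =====
-- s.islower(): at least one cased character and no uppercase one (exact on the ASCII domain, where cased = letter)
def pvIslower (s : String) : Bool :=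
  s.toList.any (fun c => PySem.Chars.islower c || PySem.Chars.isupper c)
    && s.toList.all (fun c => !PySem.Chars.isupper c)

-- the 'prev'-tracking for-loop over s[1:]
def pvLoopA : Char → List Char → Bool
  | _, [] => true
  | prev, i :: rest => if prev = '_' ∧ prev = i then false else pvLoopA i rest

def is_cplus (s : String) : Bool :=
  if !pvIslower s then false
  else
    match PySem.Str.pyGet? s 0, PySem.Str.pyGet? s (-1) with
    | some c0, some cl =>
        if c0 = '_' ∨ cl = '_' then false
        else
          match s.toList with            -- prev = s[0]; loop over s[1:]
          | [] => true                   -- unreachable: islower guard rejects ""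
          | c :: rest => pvLoopA c rest
    | _, _ => false                      -- unreachable IndexError branch

-- ===== PORT B =====
-- s.split('_') for the single-character separator is List.splitOn '_' on the code points;
-- '' not in parts is a list-membership test
def is_cplus_alt (s : String) : Bool :=
  pvIslower s && !((List.splitOn '_' s.toList).contains ([] : List Char))

-- ===== PRECONDITION & SPEC =====
def Spec_is_cplus (s : String) (out : Bool) : Prop := out = is_cplus_alt s
instance (s : String) (out : Bool) : Decidable (Spec_is_cplus s out) := by unfold Spec_is_cplus; infer_instance

-- ===== CLAIM (what is proved, stated in full; the proofs are below) =====
def Claim_equal_is_cplus : Prop := ∀ (s : String), Dom_is_cplus s → Spec_is_cplus s (is_cplus s)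

-- ===== LEMMAS AND PROOFS =====

-- A's loop returns false exactly when "__" occurs in prev :: rest
theorem pvLoopA_eq (p : Char) (l : List Char) :
    pvLoopA p l = !decide (['_', '_'] <:+: (p :: l)) := by
  induction l generalizing p with
  | nil =>
    simp [pvLoopA]
    intro h
    have := h.sublist.length_le
    simp at this
  | cons i rest ih =>
    simp only [pvLoopA]
    by_cases hp : p = '_' ∧ p = i
    · obtain ⟨h1, h2⟩ := hp
      subst h1
      simp [← h2, List.infix_cons_iff]
    · rw [if_neg hp, ih]
      have hnp : ¬ (['_', '_'] <+: p :: i :: rest) := by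
        rintro ⟨t, ht⟩
        simp at ht
        exact hp ⟨ht.1.symm, ht.1.symm.trans ht.2.1⟩
      simp [List.infix_cons_iff, hnp]

-- prefix form of the doubled-underscore pattern
theorem dd_prefix_iff (x : Char) (xs : List Char) :
    (['_', '_'] <+: x :: xs) ↔ (x = '_' ∧ xs.head? = some '_') := by
  constructor
  · rintro ⟨t, ht⟩
    injection ht with hx hxs
    exact ⟨hx.symm, by rw [← hxs]; rfl⟩
  · rintro ⟨h1, h2⟩
    cases xs with
    | nil => simp at h2
    | cons y ys =>
      simp at h2
      exact ⟨ys, by simp [h1, h2]⟩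

-- B's criterion, characterised: an empty token exists iff the string is empty,
-- starts or ends with '_', or contains a doubled '_'
theorem mem_nil_splitOn_aux (n : Nat) : ∀ cs : List Char, cs.length ≤ n →
    (([] : List Char) ∈ List.splitOnP (· == '_') cs ↔
      (cs = [] ∨ cs.head? = some '_' ∨ cs.getLast? = some '_' ∨ ['_', '_'] <:+: cs)) := by
  induction n with
  | zero =>
    intro cs h
    have : cs = [] := List.length_eq_zero_iff.mp (Nat.le_zero.mp h)
    subst this
    simp [List.splitOnP_nil]
  | succ n ih =>
    intro cs h
    cases cs with
    | nil => simp [List.splitOnP_nil]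
    | cons a l =>
      by_cases ha : a = '_'
      · subst ha
        simp [List.splitOnP_cons]
      · rw [List.splitOnP_cons, if_neg (by simp [ha])]
        cases l with
        | nil =>
          simp only [List.splitOnP_nil, List.modifyHead]
          constructor
          · intro hmem; simp at hmem
          · rintro (h | h | h | h)
            · simp at h
            · simp at h; exact absurd h ha
            · simp at h; exact absurd h ha
            · have := h.sublist.length_le; simp at this
        | cons b l' =>
          by_cases hb : b = '_'
          · subst hb
            rw [show List.splitOnP (· == '_') ('_' :: l') = [] :: List.splitOnP (· == '_') l' from by
              simp [List.splitOnP_cons]]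
            simp only [List.modifyHead]
            have hih := ih l' (by simp at h; omega)
            rw [List.mem_cons]
            cases l' with
            | nil =>
              simp [List.splitOnP_nil]
            | cons c l₂ =>
              constructor
              · rintro (hh | hmem)
                · simp at hh
                · rcases (hih.mp hmem) with h0 | h0 | h0 | h0
                  · simp at h0
                  · right; right; right
                    rw [List.infix_cons_iff]
                    right
                    rw [List.infix_cons_iff]
                    left
                    exact (dd_prefix_iff _ _).mpr ⟨rfl, by simpa using h0⟩
                  · right; right; left
                    simpa using h0
                  · right; right; right
                    exact (List.infix_cons_iff.mpr (Or.inr (List.infix_cons_iff.mpr (Or.inr h0))))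
              · rintro (h0 | h0 | h0 | h0)
                · simp at h0
                · simp at h0; exact absurd h0 ha
                · right
                  apply hih.mpr
                  right; right; left
                  simpa using h0
                · right
                  apply hih.mpr
                  rw [List.infix_cons_iff] at h0
                  rcases h0 with h0 | h0
                  · exact absurd ((dd_prefix_iff _ _).mp h0).1 ha
                  · rw [List.infix_cons_iff] at h0
                    rcases h0 with h0 | h0
                    · obtain ⟨-, hh⟩ := (dd_prefix_iff _ _).mp h0
                      right; left; exact hh
                    · right; right; right; exact h0
          · -- b ≠ '_' : the head piece of splitOnP on (b::l') is nonempty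
            obtain ⟨h', t', hsplit⟩ :
                ∃ h' t', List.splitOnP (· == '_') (b :: l') = (b :: h') :: t' := by
              obtain ⟨hd, tl, hcons⟩ :=
                List.exists_cons_of_ne_nil (List.splitOnP_ne_nil (· == '_') l')
              exact ⟨hd, tl, by simp [List.splitOnP_cons, hb, hcons, List.modifyHead]⟩
            rw [hsplit]
            simp only [List.modifyHead]
            have hih := ih (b :: l') (by simp at h ⊢; omega)
            rw [hsplit] at hih
            constructor
            · rintro hmem
              rw [List.mem_cons] at hmem
              rcases hmem with hh | hmem
              · simp at hh
              · rcases hih.mp (by simp [hmem]) with h0 | h0 | h0 | h0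
                · simp at h0
                · simp at h0; exact absurd h0 hb
                · right; right; left; simpa using h0
                · right; right; right
                  exact List.infix_cons_iff.mpr (Or.inr h0)
            · rintro (h0 | h0 | h0 | h0)
              · simp at h0
              · simp at h0; exact absurd h0 ha
              · have := hih.mpr (Or.inr (Or.inr (Or.inl (by simpa using h0))))
                rw [List.mem_cons] at this
                rcases this with hh | hmem
                · simp at hh
                · simp [hmem]
              · rw [List.infix_cons_iff] at h0
                rcases h0 with h0 | h0
                · exact absurd ((dd_prefix_iff _ _).mp h0).1 ha
                · have := hih.mpr (Or.inr (Or.inr (Or.inr h0)))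
                  rw [List.mem_cons] at this
                  rcases this with hh | hmem
                  · simp at hh
                  · simp [hmem]

theorem mem_nil_splitOn (cs : List Char) :
    (([] : List Char) ∈ List.splitOn '_' cs ↔
      (cs = [] ∨ cs.head? = some '_' ∨ cs.getLast? = some '_' ∨ ['_', '_'] <:+: cs)) := by
  rw [List.splitOn]
  exact mem_nil_splitOn_aux cs.length cs le_rfl

theorem is_cplus_spec : Claim_equal_is_cplus := by
  intro s _
  unfold Spec_is_cplus is_cplus is_cplus_alt
  by_cases hl : pvIslower s = true
  · -- islower passed: the string is nonempty
    have hne : s.toList ≠ [] := by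
      intro h0
      unfold pvIslower at hl
      rw [h0] at hl
      simp at hl
    obtain ⟨c, rest, hcr⟩ := List.exists_cons_of_ne_nil hne
    obtain ⟨cl, hclast⟩ : ∃ cl, (c :: rest).getLast? = some cl := by
      rcases h : (c :: rest).getLast? with _ | cl
      · simp at h
      · exact ⟨cl, rfl⟩
    have h0 : PySem.Str.pyGet? s 0 = some c := by
      simp [hcr]
    have hlast : PySem.Str.pyGet? s (-1) = some cl := by
      simp [hcr, PySem.List.pyGet?_neg_one, hclast]
    have hmem : ((List.splitOn '_' s.toList).contains ([] : List Char)) =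
        decide (c = '_' ∨ cl = '_' ∨ ['_', '_'] <:+: (c :: rest)) := by
      rw [Bool.eq_iff_iff, List.contains_iff_mem, decide_eq_true_eq, hcr, mem_nil_splitOn]
      simp [hclast]
    rw [hl, h0, hlast, hmem]
    simp only [Bool.not_true, Bool.false_eq_true, if_false, Bool.true_and]
    by_cases hc : c = '_' ∨ cl = '_'
    · rw [if_pos hc]
      rcases hc with hc | hc <;> simp [hc]
    · rw [if_neg hc]
      rw [not_or] at hc
      rw [hcr]
      show pvLoopA c rest = _
      rw [pvLoopA_eq]
      simp [hc.1, hc.2]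
  · simp at hl
    simp [hl]
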